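-- pv_equiv track=rewrite | github.com/ChaofanChen-fanren/C_Prime_learning | python/homework.py | str_reverse
-- ===== SOURCE A (Python) =====
-- def str_reverse(s):
--     l,u,n,o = 0,0,0,0
--     for c in s:
--         if c.isupper():
--             u = u + 1
--         elif c.islower():
--             l = l + 1
--         elif c.isdigit():
--             n = n + 1
--         else:
--             o = o + 1
--     return ("reverse str: "+ s[::-1],"lowercases: "+str(l),"uppercases: "+str(u),\
--             "numbers: "+str(n),"other characters: "+str(o))
-- ===== SOURCE B (Python) =====
-- def str_reverse(s):
--     u = sum(1 for c in s if c.isupper())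
--     l = sum(1 for c in s if c.islower())
--     n = sum(1 for c in s if c.isdigit())
--     o = len(s) - u - l - n
--     return ("reverse str: " + s[::-1], "lowercases: " + str(l), "uppercases: " + str(u),
--             "numbers: " + str(n), "other characters: " + str(o))
-- ===== Notes on version B (the rewrite author's own statement) =====
-- stated objective: idiomatic
-- what changed: Replaces the single fused if/elif/else counting loop with one independent generator-sum pass per category, deriving the remaining-characters count arithmetically as len(s)-u-l-n instead of counting it.
import Mathlib
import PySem

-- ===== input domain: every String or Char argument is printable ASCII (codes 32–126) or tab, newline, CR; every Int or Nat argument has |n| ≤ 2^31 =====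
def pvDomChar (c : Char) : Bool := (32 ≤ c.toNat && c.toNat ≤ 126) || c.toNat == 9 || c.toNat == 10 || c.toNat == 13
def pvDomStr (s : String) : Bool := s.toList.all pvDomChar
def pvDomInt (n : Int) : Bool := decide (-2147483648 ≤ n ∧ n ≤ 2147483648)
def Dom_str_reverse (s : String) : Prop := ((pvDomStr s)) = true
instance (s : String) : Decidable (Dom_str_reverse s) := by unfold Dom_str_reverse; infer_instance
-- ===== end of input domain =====

-- B replaces A's single fused if/elif/else counting loop with one pass per category and
-- derives the 'other' count as len(s) - u - l - n (idiomatic decomposition; same cost).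

-- ===== PORT A =====
-- the fused loop's step: one char updates the (l, u, n, o) counters per the if/elif chain
def pvStepA (st : Int × Int × Int × Int) (c : Char) : Int × Int × Int × Int :=
  match st with
  | (l, u, n, o) =>
    if PySem.Chars.isupper c then (l, u + 1, n, o)
    else if PySem.Chars.islower c then (l + 1, u, n, o)
    else if PySem.Chars.isdigit c then (l, u, n + 1, o)
    else (l, u, n, o + 1)

def str_reverse (s : String) : String × String × String × String × String :=
  let st := s.toList.foldl pvStepA (0, 0, 0, 0)
  match st with
  | (l, u, n, o) =>
    ("reverse str: " ++ (PySem.Str.slice? s none none (-1)).getD "",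
     "lowercases: " ++ PySem.Int.toStr l,
     "uppercases: " ++ PySem.Int.toStr u,
     "numbers: " ++ PySem.Int.toStr n,
     "other characters: " ++ PySem.Int.toStr o)

-- ===== PORT B =====
def str_reverse_alt (s : String) : String × String × String × String × String :=
  let u : Int := (s.toList.countP PySem.Chars.isupper : Int)
  let l : Int := (s.toList.countP PySem.Chars.islower : Int)
  let n : Int := (s.toList.countP PySem.Chars.isdigit : Int)
  let o : Int := PySem.Str.len s - u - l - n
  ("reverse str: " ++ (PySem.Str.slice? s none none (-1)).getD "",
   "lowercases: " ++ PySem.Int.toStr l,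
   "uppercases: " ++ PySem.Int.toStr u,
   "numbers: " ++ PySem.Int.toStr n,
   "other characters: " ++ PySem.Int.toStr o)

-- ===== PRECONDITION & SPEC =====
def Spec_str_reverse (s : String) (out : String × String × String × String × String) : Prop := out = str_reverse_alt s
instance (s : String) (out : String × String × String × String × String) : Decidable (Spec_str_reverse s out) := by unfold Spec_str_reverse; infer_instance

-- ===== CLAIM (what is proved, stated in full; the proofs are below) =====
def Claim_equal_str_reverse : Prop := ∀ (s : String), Dom_str_reverse s → Spec_str_reverse s (str_reverse s)

-- ===== LEMMAS AND PROOFS =====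
theorem pv_up_not_low {c : Char} (h : PySem.Chars.isupper c = true) :
    PySem.Chars.islower c = false := by
  simp [PySem.Chars.isupper, PySem.Chars.islower, Char.le_def, UInt32.le_iff_toNat_le] at *
  omega

theorem pv_up_not_dig {c : Char} (h : PySem.Chars.isupper c = true) :
    PySem.Chars.isdigit c = false := by
  simp [PySem.Chars.isupper, PySem.Chars.isdigit, Char.le_def, UInt32.le_iff_toNat_le] at *
  omega

theorem pv_low_not_dig {c : Char} (h : PySem.Chars.islower c = true) :
    PySem.Chars.isdigit c = false := by
  simp [PySem.Chars.islower, PySem.Chars.isdigit, Char.le_def, UInt32.le_iff_toNat_le] at *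
  omega

theorem pv_loopA (cs : List Char) : ∀ (l u n o : Int),
    cs.foldl pvStepA (l, u, n, o) =
      (l + (cs.countP PySem.Chars.islower : Int),
       u + (cs.countP PySem.Chars.isupper : Int),
       n + (cs.countP PySem.Chars.isdigit : Int),
       o + ((cs.length : Int) - (cs.countP PySem.Chars.isupper : Int)
            - (cs.countP PySem.Chars.islower : Int) - (cs.countP PySem.Chars.isdigit : Int))) := by
  induction cs with
  | nil => intro l u n o; simp
  | cons c cs ih =>
    intro l u n o
    by_cases hu : PySem.Chars.isupper c = true
    · simp [pvStepA, hu, ih, List.countP_cons, pv_up_not_low hu, pv_up_not_dig hu]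
      all_goals omega
    · by_cases hl : PySem.Chars.islower c = true
      · simp [pvStepA, hu, hl, ih, List.countP_cons, pv_low_not_dig hl]
        all_goals omega
      · by_cases hn : PySem.Chars.isdigit c = true
        · simp [pvStepA, hu, hl, hn, ih]
          all_goals omega
        · simp [pvStepA, hu, hl, hn, ih]
          all_goals omega

-- ===== VERDICT (by name: the statement is the Claim_ definition above) =====
theorem str_reverse_spec : Claim_equal_str_reverse := by
  intro s _
  unfold Spec_str_reverse str_reverse str_reverse_alt
  rw [pv_loopA]
  simp [PySem.Str.len]
  all_goals omega
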